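-- pv_equiv track=rewrite | github.com/dmendelsohn/advent_of_code | python/src/year2021/day25/solution.py | shift_col
-- ===== SOURCE A (Python) =====
-- from typing import List
--
-- Grid = List[List[str]]
--
-- def shift_col(grid: Grid, c: int) -> int:
--     num_moves = 0
--     can_wrap = grid[0][c] == "."
--     r = 0
--     while r < len(grid) - 1:
--         if grid[r][c] == "v" and grid[r+1][c] == ".":
--             num_moves += 1
--             grid[r][c] = "."
--             grid[r+1][c] = "v"
--             r += 1
--         r += 1
--     if r == len(grid) - 1 and grid[-1][c] == "v" and can_wrap:
--         num_moves += 1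
--         grid[-1][c] = "."
--         grid[0][c] = "v"
--     return num_moves
-- ===== SOURCE B (Python) =====
-- def shift_col(grid, c):
--     can_wrap = grid[0][c] == "."
--     old = [grid[r][c] for r in range(len(grid))]
--     num_moves = 0
--     for r in range(len(grid) - 1):
--         if old[r] == "v" and old[r + 1] == ".":
--             num_moves += 1
--             grid[r][c] = "."
--             grid[r + 1][c] = "v"
--     if old[-1] == "v" and can_wrap:
--         num_moves += 1
--         grid[-1][c] = "."
--         grid[0][c] = "v"
--     return num_moves
-- ===== Notes on version B (the rewrite author's own statement) =====
-- stated objective: simpler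
-- what changed: A mutates the column while scanning it, skipping an extra row after each move and deciding the final wrap from the leftover loop counter r; B takes a read-only snapshot of the column first, counts the (v, .) pairs in one plain pass over the snapshot, and decides the wrap directly from the snapshot's first and last cells.
import Mathlib
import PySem

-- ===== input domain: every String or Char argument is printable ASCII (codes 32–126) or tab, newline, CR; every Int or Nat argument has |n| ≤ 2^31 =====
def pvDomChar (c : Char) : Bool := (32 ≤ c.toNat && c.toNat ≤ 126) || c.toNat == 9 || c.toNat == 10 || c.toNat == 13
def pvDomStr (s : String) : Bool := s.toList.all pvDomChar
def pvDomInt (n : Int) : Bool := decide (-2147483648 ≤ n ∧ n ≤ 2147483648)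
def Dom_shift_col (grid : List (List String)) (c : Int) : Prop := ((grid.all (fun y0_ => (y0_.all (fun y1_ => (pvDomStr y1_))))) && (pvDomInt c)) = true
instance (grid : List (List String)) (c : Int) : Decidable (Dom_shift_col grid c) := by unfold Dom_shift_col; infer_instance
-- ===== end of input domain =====

-- B re-decomposes A's mutate-while-scanning loop (with its skip step) into a read-only
-- snapshot of the column plus a plain pair count; the claim is about the RETURN value
-- (both Pythons also perform the same in-place grid mutation, not modelled here).

-- ===== PORT A =====
-- grid[ri]  (Python indexing; the default is only reached outside Pre_)
def pvRow (grid : List (List String)) (ri : Int) : List String := PySem.List.pyGetD grid ri []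
-- grid[ri][c]
def pvCell (grid : List (List String)) (ri c : Int) : String := PySem.List.pyGetD (pvRow grid ri) c ""
-- grid[ri][c] = v
def pvSetCell (grid : List (List String)) (ri c : Int) (v : String) : List (List String) :=
  PySem.List.pySetD grid ri (PySem.List.pySetD (pvRow grid ri) c v)

-- the while loop of A: state (grid, r, num_moves); fuel = len(grid) bounds the iterations
def shift_col_go (c : Int) : Nat → List (List String) → Nat → Int → (List (List String) × Nat × Int)
  | 0, g, r, n => (g, r, n)
  | fuel + 1, g, r, n =>
    if r + 1 < g.length then
      if pvCell g (r : Int) c = "v" ∧ pvCell g ((r : Int) + 1) c = "." then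
        shift_col_go c fuel (pvSetCell (pvSetCell g (r : Int) c ".") ((r : Int) + 1) c "v") (r + 2) (n + 1)
      else shift_col_go c fuel g (r + 1) n
    else (g, r, n)

def shift_col (grid : List (List String)) (c : Int) : Int :=
  let canWrap := pvCell grid 0 c = "."
  let res := shift_col_go c grid.length grid 0 0
  -- Python's wrap branch also mutates the grid; the mutation does not affect the return value
  if res.2.1 + 1 = res.1.length ∧ pvCell res.1 (-1) c = "v" ∧ canWrap then res.2.2 + 1 else res.2.2

-- ===== PORT B =====
def shift_col_alt (grid : List (List String)) (c : Int) : Int :=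
  let canWrap := PySem.List.pyGetD (PySem.List.pyGetD grid 0 []) c "" = "."
  let old := (PySem.List.pyRange 0 (grid.length : Int) 1).map
      (fun r => PySem.List.pyGetD (PySem.List.pyGetD grid r []) c "")
  let n := (PySem.List.pyRange 0 ((grid.length : Int) - 1) 1).foldl
      (fun acc r =>
        if PySem.List.pyGetD old r "" = "v" ∧ PySem.List.pyGetD old (r + 1) "" = "." then acc + 1
        else acc) 0
  if PySem.List.pyGetD old (-1) "" = "v" ∧ canWrap then n + 1 else n

-- ===== PRECONDITION & SPEC =====
-- Pre_ excludes exactly the inputs where Python A raises IndexError: the empty grid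
-- (grid[0] fails) and a column index c out of range for some row.
def Pre_shift_col (grid : List (List String)) (c : Int) : Prop :=
  grid ≠ [] ∧ ∀ row ∈ grid, PySem.Raise.InRange row.length c
instance (grid : List (List String)) (c : Int) : Decidable (Pre_shift_col grid c) := by
  unfold Pre_shift_col; infer_instance
def pvWitness_shift_col : List (List String) × Int := ([["v"], ["."]], 0)

def Spec_shift_col (grid : List (List String)) (c : Int) (out : Int) : Prop := out = shift_col_alt grid c
instance (grid : List (List String)) (c : Int) (out : Int) : Decidable (Spec_shift_col grid c out) := by
  unfold Spec_shift_col; infer_instance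

-- ===== CLAIM (what is proved, stated in full; the proofs are below) =====
def Claim_equal_shift_col : Prop := ∀ (grid : List (List String)) (c : Int), Dom_shift_col grid c → Pre_shift_col grid c → Spec_shift_col grid c (shift_col grid c)

-- ===== LEMMAS AND PROOFS =====

-- column c of the grid, as a list of cells
def pvCol (grid : List (List String)) (c : Int) : List String :=
  grid.map (fun row => PySem.List.pyGetD row c "")

-- A's loop, abstracted to act on the column only
def pvColLoop : Nat → List String → Nat → Int → (List String × Nat × Int)
  | 0, xs, r, n => (xs, r, n)
  | fuel + 1, xs, r, n =>
    if r + 1 < xs.length then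
      if xs.getD r "" = "v" ∧ xs.getD (r + 1) "" = "." then
        pvColLoop fuel ((xs.set r ".").set (r + 1) "v") (r + 2) (n + 1)
      else pvColLoop fuel xs (r + 1) n
    else (xs, r, n)

-- number of adjacent (v, .) pairs in a column
def pvCnt : List String → Int
  | x :: y :: t => (if x = "v" ∧ y = "." then 1 else 0) + pvCnt (y :: t)
  | _ => 0

theorem pvIdx_some (n : Nat) (c : Int) (h : PySem.Raise.InRange n c) :
    ∃ k, PySem.List.pyIdx? n c = some k ∧ k < n := by
  obtain ⟨h1, h2⟩ := h
  unfold PySem.List.pyIdx?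
  split_ifs
  all_goals first
    | exact ⟨c.toNat, rfl, by omega⟩
    | exact ⟨n - (-c).toNat, rfl, by omega⟩

theorem pvGetD_setD_self (xs : List String) (c : Int) (v d : String)
    (h : PySem.Raise.InRange xs.length c) :
    PySem.List.pyGetD (PySem.List.pySetD xs c v) c d = v := by
  obtain ⟨k, hk, hklt⟩ := pvIdx_some xs.length c h
  simp [PySem.List.pySetD, PySem.List.pySet?, hk, PySem.List.pyGetD, PySem.List.pyGet?,
    List.length_set, hklt]

theorem pvGetD_empty (c : Int) (d : String) : PySem.List.pyGetD ([] : List String) c d = d := by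
  simp [PySem.List.pyGetD, PySem.List.pyGet?, PySem.List.pyIdx?]

-- grid cell read = column read
theorem pvCell_col (g : List (List String)) (r : Nat) (c : Int) :
    pvCell g (r : Int) c = (pvCol g c).getD r "" := by
  simp only [pvCell, pvRow, PySem.List.pyGetD_natCast]
  cases h : g[r]? with
  | none =>
    simp [pvCol, List.getD, h, List.getElem?_map, pvGetD_empty]
  | some row =>
    simp [pvCol, List.getD, h, List.getElem?_map]

theorem pvRow_eq (g : List (List String)) (r : Nat) (hr : r < g.length) :
    pvRow g (r : Int) = g[r] := by
  simp [pvRow, List.getD, List.getElem?_eq_getElem hr]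

-- grid cell write = column write
theorem pvCol_set (g : List (List String)) (r : Nat) (c : Int) (v : String)
    (hr : r < g.length) (hin : PySem.Raise.InRange (g[r].length) c) :
    pvCol (pvSetCell g (r : Int) c v) c = (pvCol g c).set r v := by
  simp only [pvSetCell, pvRow_eq g r hr, PySem.List.pySetD_natCast, pvCol, List.map_set]
  rw [pvGetD_setD_self _ _ _ _ hin]

theorem pvInv_set (g : List (List String)) (r : Nat) (c : Int) (v : String)
    (hr : r < g.length)
    (hinv : ∀ row ∈ g, PySem.Raise.InRange row.length c) :
    ∀ row ∈ pvSetCell g (r : Int) c v, PySem.Raise.InRange row.length c := by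
  intro row hmem
  simp only [pvSetCell, PySem.List.pySetD_natCast] at hmem
  rcases List.mem_or_eq_of_mem_set hmem with h | h
  · exact hinv _ h
  · subst h
    rw [PySem.List.length_pySetD, pvRow_eq g r hr]
    exact hinv _ (List.getElem_mem hr)

theorem pvLen_setCell (g : List (List String)) (r : Nat) (c : Int) (v : String) :
    (pvSetCell g (r : Int) c v).length = g.length := by
  simp [pvSetCell, PySem.List.pySetD_natCast]

-- simulation: A's loop on the grid projects to the column loop
theorem pvGo_sim (c : Int) : ∀ (fuel : Nat) (g : List (List String)) (r : Nat) (n : Int),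
    (∀ row ∈ g, PySem.Raise.InRange row.length c) →
    (pvCol (shift_col_go c fuel g r n).1 c, (shift_col_go c fuel g r n).2.1,
        (shift_col_go c fuel g r n).2.2) = pvColLoop fuel (pvCol g c) r n := by
  intro fuel
  induction fuel with
  | zero => intro g r n _; rfl
  | succ fuel ih =>
    intro g r n hinv
    have hlen : (pvCol g c).length = g.length := by simp [pvCol]
    by_cases hr : r + 1 < g.length
    · have hr' : r + 1 < (pvCol g c).length := by omega
      have h1 : r < g.length := by omega
      by_cases hcond : pvCell g (r : Int) c = "v" ∧ pvCell g ((r : Int) + 1) c = "."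
      · have e2 : ((r : Int) + 1) = (((r + 1 : Nat)) : Int) := by push_cast; ring
        have hcond' : (pvCol g c).getD r "" = "v" ∧ (pvCol g c).getD (r + 1) "" = "." := by
          refine ⟨by rw [← pvCell_col]; exact hcond.1, by rw [← pvCell_col]; rw [← e2]; exact hcond.2⟩
        have hinv1 : ∀ row ∈ pvSetCell g (r : Int) c ".", PySem.Raise.InRange row.length c :=
          pvInv_set g r c "." h1 hinv
        have hlen1 : (pvSetCell g (r : Int) c ".").length = g.length := pvLen_setCell g r c "."
        have h2 : r + 1 < (pvSetCell g (r : Int) c ".").length := by omega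
        have hinv2 : ∀ row ∈ pvSetCell (pvSetCell g (r : Int) c ".") ((r : Int) + 1) c "v",
            PySem.Raise.InRange row.length c := by
          rw [e2]; exact pvInv_set _ (r + 1) c "v" h2 hinv1
        have hcol2 : pvCol (pvSetCell (pvSetCell g (r : Int) c ".") ((r : Int) + 1) c "v") c
            = ((pvCol g c).set r ".").set (r + 1) "v" := by
          have e1 : pvCol (pvSetCell g (r : Int) c ".") c = (pvCol g c).set r "." :=
            pvCol_set g r c "." h1 (hinv _ (List.getElem_mem h1))
          rw [e2, pvCol_set _ (r + 1) c "v" h2 (hinv1 _ (List.getElem_mem h2)), e1]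
        have hgo : shift_col_go c (fuel + 1) g r n
            = shift_col_go c fuel (pvSetCell (pvSetCell g (r : Int) c ".") ((r : Int) + 1) c "v") (r + 2) (n + 1) := by
          simp only [shift_col_go]; rw [if_pos hr, if_pos hcond]
        have hcl : pvColLoop (fuel + 1) (pvCol g c) r n
            = pvColLoop fuel (((pvCol g c).set r ".").set (r + 1) "v") (r + 2) (n + 1) := by
          simp only [pvColLoop]; rw [if_pos hr', if_pos hcond']
        rw [hgo, hcl, ← hcol2]
        exact ih _ (r + 2) (n + 1) hinv2
      · have hcond' : ¬ ((pvCol g c).getD r "" = "v" ∧ (pvCol g c).getD (r + 1) "" = ".") := by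
          rw [← pvCell_col, ← pvCell_col]
          have e2 : (((r + 1 : Nat)) : Int) = ((r : Int) + 1) := by push_cast; ring
          rw [e2]; exact hcond
        have hgo : shift_col_go c (fuel + 1) g r n = shift_col_go c fuel g (r + 1) n := by
          simp only [shift_col_go]; rw [if_pos hr, if_neg hcond]
        have hcl : pvColLoop (fuel + 1) (pvCol g c) r n = pvColLoop fuel (pvCol g c) (r + 1) n := by
          simp only [pvColLoop]; rw [if_pos hr', if_neg hcond']
        rw [hgo, hcl]
        exact ih g (r + 1) n hinv
    · have hr' : ¬ r + 1 < (pvCol g c).length := by omega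
      have hgo : shift_col_go c (fuel + 1) g r n = (g, r, n) := by
        simp only [shift_col_go]; rw [if_neg hr]
      have hcl : pvColLoop (fuel + 1) (pvCol g c) r n = (pvCol g c, r, n) := by
        simp only [pvColLoop]; rw [if_neg hr']
      rw [hgo, hcl]

theorem pvCnt_short (l : List String) (h : l.length ≤ 1) : pvCnt l = 0 := by
  match l with
  | [] => rfl
  | [x] => rfl
  | x :: y :: t => simp at h

theorem pvCnt_dot (t : List String) : pvCnt ("." :: t) = pvCnt t := by
  cases t <;> simp [pvCnt]

-- behaviour of the abstract loop: pair count and final-state characterisation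
theorem pvColLoop_spec : ∀ (fuel : Nat) (xs : List String) (r : Nat) (n : Int),
    xs.length ≤ r + fuel →
    (pvColLoop fuel xs r n).1.length = xs.length ∧
    (pvColLoop fuel xs r n).2.2 = n + pvCnt (xs.drop r) ∧
    (((pvColLoop fuel xs r n).2.1 + 1 = xs.length ∧
        (pvColLoop fuel xs r n).1.getLast?.getD "" = "v")
      ↔ (r + 1 ≤ xs.length ∧ xs.getLast?.getD "" = "v")) := by
  intro fuel
  induction fuel with
  | zero =>
    intro xs r n hf
    refine ⟨rfl, ?_, ?_⟩
    · show n = n + pvCnt (xs.drop r)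
      rw [pvCnt_short _ (by simp; omega)]; ring
    · show ((r + 1 = xs.length ∧ xs.getLast?.getD "" = "v") ↔ _)
      constructor <;> rintro ⟨ha, hb⟩ <;> exact ⟨by omega, hb⟩
  | succ fuel ih =>
    intro xs r n hf
    by_cases hr : r + 1 < xs.length
    · have h1 : r < xs.length := by omega
      by_cases hcond : xs.getD r "" = "v" ∧ xs.getD (r + 1) "" = "."
      · have hcl : pvColLoop (fuel + 1) xs r n
            = pvColLoop fuel ((xs.set r ".").set (r + 1) "v") (r + 2) (n + 1) := by
          simp only [pvColLoop]; rw [if_pos hr, if_pos hcond]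
        have hlen2 : ((xs.set r ".").set (r + 1) "v").length = xs.length := by simp
        obtain ⟨ihl, ihn, ihiff⟩ := ih ((xs.set r ".").set (r + 1) "v") (r + 2) (n + 1)
          (by rw [hlen2]; omega)
        have hdropset : ((xs.set r ".").set (r + 1) "v").drop (r + 2) = xs.drop (r + 2) := by
          rw [List.drop_set, List.drop_set]
          simp
        have hxr : xs[r] = "v" := by rw [← List.getD_eq_getElem xs "" h1]; exact hcond.1
        have hxr1 : xs[r + 1] = "." := by rw [← List.getD_eq_getElem xs "" hr]; exact hcond.2
        have hdrop : xs.drop r = "v" :: "." :: xs.drop (r + 2) := by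
          rw [List.drop_eq_getElem_cons h1, List.drop_eq_getElem_cons hr, hxr, hxr1]
        refine ⟨?_, ?_, ?_⟩
        · rw [hcl, ihl, hlen2]
        · rw [hcl, ihn, hdropset, hdrop]
          have : pvCnt ("v" :: "." :: xs.drop (r + 2)) = 1 + pvCnt (xs.drop (r + 2)) := by
            rw [show pvCnt ("v" :: "." :: xs.drop (r + 2))
                = (if ("v" : String) = "v" ∧ ("." : String) = "." then 1 else 0)
                  + pvCnt ("." :: xs.drop (r + 2)) from rfl, pvCnt_dot]
            norm_num
          rw [this]; ring
        · rw [hcl]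
          rw [hlen2] at ihiff
          rw [ihiff]
          by_cases hend : r + 2 = xs.length
          · have hlast : xs.getLast?.getD "" = "." := by
              have hidx : xs.length - 1 = r + 1 := by omega
              rw [List.getLast?_eq_getElem?, hidx, List.getElem?_eq_getElem hr, hxr1]
              rfl
            constructor
            · rintro ⟨ha, _⟩; omega
            · rintro ⟨_, hb⟩; rw [hlast] at hb; exact absurd hb (by decide)
          · have hlt : r + 2 < xs.length := by omega
            have hlast2 : ((xs.set r ".").set (r + 1) "v").getLast?.getD "" = xs.getLast?.getD "" := by
              rw [List.getLast?_eq_getElem?, List.getLast?_eq_getElem?, hlen2]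
              rw [List.getElem?_set, List.getElem?_set]
              have hne1 : ¬ (r + 1 = xs.length - 1) := by omega
              have hne2 : ¬ (r = xs.length - 1) := by omega
              simp [hne1, hne2]
            rw [hlast2]
            constructor <;> rintro ⟨ha, hb⟩ <;> exact ⟨by omega, hb⟩
      · have hcl : pvColLoop (fuel + 1) xs r n = pvColLoop fuel xs (r + 1) n := by
          simp only [pvColLoop]; rw [if_pos hr, if_neg hcond]
        obtain ⟨ihl, ihn, ihiff⟩ := ih xs (r + 1) n (by omega)
        have hxr : xs.getD r "" = xs[r] := List.getD_eq_getElem xs "" h1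
        have hxr1 : xs.getD (r + 1) "" = xs[r + 1] := List.getD_eq_getElem xs "" hr
        have hdrop : xs.drop r = xs[r] :: xs.drop (r + 1) := List.drop_eq_getElem_cons h1
        have hdrop1 : xs.drop (r + 1) = xs[r + 1] :: xs.drop (r + 2) := List.drop_eq_getElem_cons hr
        refine ⟨by rw [hcl, ihl], ?_, ?_⟩
        · rw [hcl, ihn, hdrop, hdrop1]
          have : pvCnt (xs[r] :: xs[r + 1] :: xs.drop (r + 2))
              = (if xs[r] = "v" ∧ xs[r + 1] = "." then 1 else 0)
                + pvCnt (xs[r + 1] :: xs.drop (r + 2)) := rfl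
          rw [this, if_neg (by rw [← hxr, ← hxr1]; exact hcond)]
          ring
        · rw [hcl, ihiff]
          constructor <;> rintro ⟨ha, hb⟩ <;> exact ⟨by omega, hb⟩
    · have hcl : pvColLoop (fuel + 1) xs r n = (xs, r, n) := by
        simp only [pvColLoop]; rw [if_neg hr]
      rw [hcl]
      refine ⟨rfl, ?_, ?_⟩
      · show n = n + pvCnt (xs.drop r)
        rw [pvCnt_short _ (by simp; omega)]; ring
      · show ((r + 1 = xs.length ∧ xs.getLast?.getD "" = "v") ↔ _)
        constructor <;> rintro ⟨ha, hb⟩ <;> exact ⟨by omega, hb⟩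

-- index-count over a range equals the structural pair count
theorem pvFold_shift : ∀ (t : List String) (x : String) (acc : Int),
    (List.range t.length).foldl
      (fun a i => if (x :: t).getD i "" = "v" ∧ (x :: t).getD (i + 1) "" = "." then a + 1 else a) acc
    = acc + pvCnt (x :: t) := by
  intro t
  induction t with
  | nil => intro x acc; simp [pvCnt]
  | cons y t ih =>
    intro x acc
    rw [show (y :: t).length = t.length + 1 from rfl, List.range_succ_eq_map]
    rw [List.foldl_cons, List.foldl_map]
    simp only [List.getD_cons_zero, List.getD_cons_succ, Nat.succ_eq_add_one]
    have ih' := ih y (if x = "v" ∧ y = "." then acc + 1 else acc)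
    simp only [List.getD_cons_succ] at ih'
    rw [ih']
    rw [show pvCnt (x :: y :: t)
        = (if x = "v" ∧ y = "." then 1 else 0) + pvCnt (y :: t) from rfl]
    split_ifs <;> ring

theorem pvCell_neg_one (g : List (List String)) (c : Int) (h : g ≠ []) :
    pvCell g (-1) c = (pvCol g c).getLast?.getD "" := by
  simp only [pvCell, pvRow, PySem.List.pyGetD_neg_one g [] h, pvCol, List.getLast?_map]
  rw [List.getLast?_eq_some_getLast h]
  rfl

-- B rewritten as a pair count over the column snapshot
theorem pvAlt_eq (grid : List (List String)) (c : Int) (hne : grid ≠ []) :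
    shift_col_alt grid c =
      if (pvCol grid c).getLast?.getD "" = "v" ∧ pvCell grid 0 c = "." then pvCnt (pvCol grid c) + 1
      else pvCnt (pvCol grid c) := by
  have hlen1 : 1 ≤ grid.length := by
    cases grid with | nil => exact absurd rfl hne | cons a l => simp
  have hold : (PySem.List.pyRange 0 (grid.length : Int) 1).map
      (fun r => PySem.List.pyGetD (PySem.List.pyGetD grid r []) c "") = pvCol grid c := by
    rw [PySem.List.pyRange_zero_natCast, List.map_map]
    apply List.ext_getElem (by simp [pvCol])
    intro i h1 h2
    simp only [List.getElem_map, List.getElem_range, Function.comp_apply]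
    have := pvCell_col grid i c
    simp only [pvCell, pvRow] at this
    rw [this, List.getD_eq_getElem _ "" (by simpa [pvCol] using h2)]
  have hcolne : pvCol grid c ≠ [] := by
    simp [pvCol]; exact hne
  unfold shift_col_alt
  dsimp only
  rw [hold]
  have hcast : ((grid.length : Int) - 1) = (((grid.length - 1 : Nat)) : Int) := by omega
  rw [hcast, PySem.List.pyRange_zero_natCast, List.foldl_map]
  have hbody : (fun (acc : Int) (k : Nat) =>
      if PySem.List.pyGetD (pvCol grid c) (k : Int) "" = "v"
          ∧ PySem.List.pyGetD (pvCol grid c) ((k : Int) + 1) "" = "." then acc + 1 else acc)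
      = (fun (acc : Int) (k : Nat) =>
      if (pvCol grid c).getD k "" = "v" ∧ (pvCol grid c).getD (k + 1) "" = "." then acc + 1
      else acc) := by
    funext acc k
    rw [show ((k : Int) + 1) = (((k + 1 : Nat)) : Int) by push_cast; ring]
    rw [PySem.List.pyGetD_natCast, PySem.List.pyGetD_natCast]
  rw [hbody]
  obtain ⟨x, t, hxt⟩ : ∃ x t, pvCol grid c = x :: t := by
    cases h : pvCol grid c with
    | nil => exact absurd h hcolne
    | cons x t => exact ⟨x, t, rfl⟩
  have hlent : grid.length - 1 = t.length := by
    have : (pvCol grid c).length = grid.length := by simp [pvCol]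
    rw [hxt] at this; simp at this; omega
  rw [hxt, hlent, pvFold_shift t x 0, PySem.List.pyGetD_neg_one _ "" (by simp)]
  have hlast : (x :: t).getLast (by simp) = (x :: t).getLast?.getD "" := by
    rw [List.getLast?_eq_some_getLast (List.cons_ne_nil x t)]
    rfl
  simp only [hlast, pvCell, pvRow, zero_add]
  rfl

-- A rewritten the same way
theorem pvA_eq (grid : List (List String)) (c : Int) (hpre : Pre_shift_col grid c) :
    shift_col grid c =
      if (pvCol grid c).getLast?.getD "" = "v" ∧ pvCell grid 0 c = "." then pvCnt (pvCol grid c) + 1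
      else pvCnt (pvCol grid c) := by
  obtain ⟨hne, hinv⟩ := hpre
  have hlen1 : 1 ≤ grid.length := by
    cases grid with | nil => exact absurd rfl hne | cons a l => simp
  have hsim := pvGo_sim c grid.length grid 0 0 hinv
  have hlencol : (pvCol grid c).length = grid.length := by simp [pvCol]
  obtain ⟨hL, hN, hIff⟩ := pvColLoop_spec grid.length (pvCol grid c) 0 0 (by omega)
  set res := shift_col_go c grid.length grid 0 0 with hres
  have hproj1 : pvCol res.1 c = (pvColLoop grid.length (pvCol grid c) 0 0).1 := by
    rw [← hsim]
  have hproj2 : res.2.1 = (pvColLoop grid.length (pvCol grid c) 0 0).2.1 := by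
    rw [← hsim]
  have hproj3 : res.2.2 = (pvColLoop grid.length (pvCol grid c) 0 0).2.2 := by
    rw [← hsim]
  have hreslen : res.1.length = grid.length := by
    have : (pvCol res.1 c).length = res.1.length := by simp [pvCol]
    rw [hproj1, hL, hlencol] at this
    omega
  have hresne : res.1 ≠ [] := by
    intro h; rw [h] at hreslen; simp at hreslen; omega
  unfold shift_col
  rw [← hres]
  have hcell : pvCell res.1 (-1) c = (pvColLoop grid.length (pvCol grid c) 0 0).1.getLast?.getD "" := by
    rw [pvCell_neg_one res.1 c hresne, hproj1]
  have hcond : (res.2.1 + 1 = res.1.length ∧ pvCell res.1 (-1) c = "v" ∧ pvCell grid 0 c = ".")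
      ↔ ((pvCol grid c).getLast?.getD "" = "v" ∧ pvCell grid 0 c = ".") := by
    rw [hcell, hproj2, hreslen]
    have hIff' := hIff
    rw [hlencol] at hIff'
    constructor
    · rintro ⟨ha, hb, hc2⟩
      exact ⟨(hIff'.mp ⟨ha, hb⟩).2, hc2⟩
    · rintro ⟨ha, hc2⟩
      obtain ⟨h1, h2⟩ := hIff'.mpr ⟨by omega, ha⟩
      exact ⟨h1, h2, hc2⟩
  have hn : res.2.2 = pvCnt (pvCol grid c) := by
    rw [hproj3, hN]; simp
  by_cases hc2 : (pvCol grid c).getLast?.getD "" = "v" ∧ pvCell grid 0 c = "."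
  · rw [if_pos (hcond.mpr hc2), if_pos hc2, hn]
  · rw [if_neg (fun h => hc2 (hcond.mp h)), if_neg hc2, hn]

-- ===== VERDICT (by name: the statement is the Claim_ definition above) =====
theorem shift_col_spec : Claim_equal_shift_col := by
  intro grid c _ hpre
  unfold Spec_shift_col
  rw [pvA_eq grid c hpre, pvAlt_eq grid c hpre.1]
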